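-- pv_equiv track=rewrite | github.com/DuoMarketLLC/duo-prospect-engine | src/duo_prospect_engine/prospect_engine.py | infer_selling_products
-- ===== SOURCE A (Python) =====
-- def infer_selling_products(category: str) -> bool:
--     """Infer if a business likely sells products based on category wording."""
--     text = category.lower()
--     product_signals = {
--         "store",
--         "shop",
--         "market",
--         "retail",
--         "bakery",
--         "restaurant",
--         "cafe",
--         "food",
--         "beverage",
--         "boutique",
--         "pharmacy",
--         "dealer",
--         "brand",
--     }
--     return any(signal in text for signal in product_signals)
-- ===== SOURCE B (Python) =====
-- def infer_selling_products(category: str) -> bool: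
--     """Infer if a business likely sells products based on category wording."""
--     signals = ("store", "shop", "market", "retail", "bakery", "restaurant",
--                "cafe", "food", "beverage", "boutique", "pharmacy", "dealer",
--                "brand")
--     text = category.lower()
--     for i in range(len(text)):
--         if text.startswith(signals, i):
--             return True
--     return False
-- ===== Notes on version B (the rewrite author's own statement) =====
-- stated objective: alternative
-- what changed: B makes a single left-to-right scan over the lowercased text, testing at each position whether any signal starts there (one tuple startswith per position), instead of A's one full substring search per signal over the whole text.
import Mathlib
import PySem

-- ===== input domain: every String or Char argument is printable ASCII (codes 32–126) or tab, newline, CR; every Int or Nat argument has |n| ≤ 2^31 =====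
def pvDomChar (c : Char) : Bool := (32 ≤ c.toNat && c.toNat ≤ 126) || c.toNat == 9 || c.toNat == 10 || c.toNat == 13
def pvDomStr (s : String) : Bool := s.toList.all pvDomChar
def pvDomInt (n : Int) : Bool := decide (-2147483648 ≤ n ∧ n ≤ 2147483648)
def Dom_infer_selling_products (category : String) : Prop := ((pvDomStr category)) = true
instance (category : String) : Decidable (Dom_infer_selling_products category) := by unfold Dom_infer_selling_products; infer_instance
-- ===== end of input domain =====

-- B replaces A's per-signal substring searches by a single left-to-right scan of the
-- lowercased text, testing at each position whether any signal starts there (alternative).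

-- ===== PORT A =====
def infer_selling_products (category : String) : Bool :=
  let text := PySem.Str.lower category
  let product_signals : PySem.Set String := PySem.Set.ofList
    ["store", "shop", "market", "retail", "bakery", "restaurant", "cafe",
     "food", "beverage", "boutique", "pharmacy", "dealer", "brand"]
  product_signals.any (fun signal => PySem.Str.isIn signal text)

-- ===== PORT B =====
-- the tuple of signals from Source B
def pvSignals : List String :=
  ["store", "shop", "market", "retail", "bakery", "restaurant", "cafe",
   "food", "beverage", "boutique", "pharmacy", "dealer", "brand"]

-- the 'for i in range(len(text)): if text.startswith(signals, i)' loop, as a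
-- structural scan over the suffixes of the text (position i ↔ suffix at i)
def pvScan (sigs : List String) : List Char → Bool
  | [] => false
  | c :: t => sigs.any (fun s => PySem.Chars.startswith (c :: t) s.toList) || pvScan sigs t

def infer_selling_products_alt (category : String) : Bool :=
  pvScan pvSignals (PySem.Chars.lower category.toList)

-- ===== PRECONDITION & SPEC =====
def Spec_infer_selling_products (category : String) (out : Bool) : Prop := out = infer_selling_products_alt category
instance (category : String) (out : Bool) : Decidable (Spec_infer_selling_products category out) := by unfold Spec_infer_selling_products; infer_instance

-- ===== CLAIM (what is proved, stated in full; the proofs are below) =====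
def Claim_equal_infer_selling_products : Prop := ∀ (category : String), Dom_infer_selling_products category → Spec_infer_selling_products category (infer_selling_products category)

-- ===== LEMMAS AND PROOFS =====

-- the scan over suffixes finds exactly the substring occurrences (for nonempty signals)
theorem pvScan_eq_any_isIn (sigs : List String) (h : ∀ s ∈ sigs, s.toList ≠ [])
    (l : List Char) : pvScan sigs l = sigs.any (fun s => PySem.Chars.isIn s.toList l) := by
  induction l with
  | nil =>
    simp only [pvScan]
    symm
    rw [List.any_eq_false]
    intro s hs
    rw [Bool.not_eq_true, PySem.Chars.isIn_eq_false_iff]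
    intro hinf
    exact h s hs (List.eq_nil_of_infix_nil hinf)
  | cons c t ih =>
    simp only [pvScan, ih]
    rw [Bool.eq_iff_iff]
    simp only [Bool.or_eq_true, List.any_eq_true]
    constructor
    · rintro (⟨s, hs, hp⟩ | ⟨s, hs, hi⟩)
      · exact ⟨s, hs, by
          rw [PySem.Chars.isIn_iff_infix]
          exact ((PySem.Chars.startswith_iff _ _).mp hp).isInfix⟩
      · refine ⟨s, hs, ?_⟩
        rw [PySem.Chars.isIn_iff_infix] at hi ⊢
        exact hi.trans (List.suffix_cons c t).isInfix
    · rintro ⟨s, hs, hi⟩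
      rw [PySem.Chars.isIn_iff_infix, List.infix_cons_iff] at hi
      rcases hi with hp | hi
      · exact Or.inl ⟨s, hs, (PySem.Chars.startswith_iff _ _).mpr hp⟩
      · exact Or.inr ⟨s, hs, by rw [PySem.Chars.isIn_iff_infix]; exact hi⟩

theorem pvSet_signals : PySem.Set.ofList pvSignals = pvSignals := by decide

-- ===== VERDICT (by name: the statement is the Claim_ definition above) =====
theorem infer_selling_products_spec : Claim_equal_infer_selling_products := by
  intro category _
  unfold Spec_infer_selling_products infer_selling_products infer_selling_products_alt
  rw [show PySem.Set.ofList
    ["store", "shop", "market", "retail", "bakery", "restaurant", "cafe",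
     "food", "beverage", "boutique", "pharmacy", "dealer", "brand"] = pvSignals from pvSet_signals]
  rw [pvScan_eq_any_isIn pvSignals (by decide)]
  apply PySem.List.any_congr_mem
  intro s _
  rw [Bool.eq_iff_iff, PySem.Str.isIn_iff_infix, PySem.Chars.isIn_iff_infix,
    PySem.Str.toList_lower]
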